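-- pv_equiv track=rewrite | github.com/petlindg/advent-of-code | 2/script.py | incSafe
-- ===== SOURCE A (Python) =====
-- def incSafe1(last, xs):
--     for i in range(len(xs)):
--         x = xs[i]
--         if x<=last or x>last+3:
--             return 0
--         last = x
--     return 1
--
-- def incSafe(xs):
--     last = xs[0]
--     for i in range(1, len(xs)):
--         x = xs[i]
--         if x<=last or x>last+3:
--             return incSafe1(last, xs[i+1:len(xs)])
--         last = x
--     return 1
-- ===== SOURCE B (Python) =====
-- def incSafe(xs):
--     n = len(xs)
--     bad = [i for i in range(1, n) if xs[i] <= xs[i-1] or xs[i] > xs[i-1] + 3]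
--     if not bad:
--         return 1
--     i = bad[0]
--     if any(j != i + 1 for j in bad[1:]):
--         return 0
--     if i + 1 < n and (xs[i+1] <= xs[i-1] or xs[i+1] > xs[i-1] + 3):
--         return 0
--     return 1
-- ===== Notes on version B (the rewrite author's own statement) =====
-- stated objective: alternative
-- what changed: A's find-first-violation-then-delete-and-rescan is replaced by one pass collecting ALL violating pair indices followed by a constant-time local decision (all violations must lie in {i, i+1} and the bridging pair xs[i-1],xs[i+1], if it exists, must be in order) with no second scan or list rebuilding.
-- crash fix: On the empty list A raises IndexError (xs[0]); B returns 1, an empty report being trivially in order. — e.g. on incSafe([]): A raises IndexError, B returns 1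
import Mathlib
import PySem

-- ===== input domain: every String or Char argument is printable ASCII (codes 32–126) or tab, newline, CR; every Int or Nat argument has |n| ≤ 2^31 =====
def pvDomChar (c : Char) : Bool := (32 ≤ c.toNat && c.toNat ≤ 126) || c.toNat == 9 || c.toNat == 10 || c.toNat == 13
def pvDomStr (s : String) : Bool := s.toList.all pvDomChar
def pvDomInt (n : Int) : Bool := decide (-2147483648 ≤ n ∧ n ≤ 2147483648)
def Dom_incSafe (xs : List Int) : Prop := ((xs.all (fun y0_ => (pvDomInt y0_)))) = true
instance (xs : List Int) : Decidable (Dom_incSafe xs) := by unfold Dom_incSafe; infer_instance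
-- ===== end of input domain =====

-- B replaces A's find-first-violation-then-delete-and-rescan by one pass collecting
-- all violating pair indices plus a constant-time local decision (objective: alternative);
-- same return value wherever A returns.

-- ===== PORT A =====
-- for i in range(len(xs)): checks each x against last, threading last
def incSafe1 (last : Int) (xs : List Int) : Int :=
  match xs with
  | [] => 1
  | x :: rest => if x ≤ last ∨ x > last + 3 then 0 else incSafe1 x rest

-- the loop 'for i in range(1, len(xs))' of incSafe, last threaded; on a violation
-- at xs[i] it calls incSafe1(last, xs[i+1:]) — here 'rest' is exactly xs[i+1:]
def incSafeLoop (last : Int) (ys : List Int) : Int :=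
  match ys with
  | [] => 1
  | x :: rest => if x ≤ last ∨ x > last + 3 then incSafe1 last rest else incSafeLoop x rest

def incSafe (xs : List Int) : Int :=
  match xs with
  | [] => 0  -- Python raises IndexError on xs[0] here; excluded by Pre_incSafe
  | x0 :: rest => incSafeLoop x0 rest

-- ===== PORT B =====
-- the comprehension '[i for i in range(1, n) if xs[i] <= xs[i-1] or xs[i] > xs[i-1]+3]':
-- walk the adjacent pairs once, prev = xs[i-1], i the current index
def badAux (prev : Int) (ys : List Int) (i : Nat) : List Nat :=
  match ys with
  | [] => []
  | y :: rest => (if y ≤ prev ∨ y > prev + 3 then [i] else []) ++ badAux y rest (i + 1)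

def incSafe_alt (xs : List Int) : Int :=
  let n := xs.length
  let bad : List Nat := match xs with | [] => [] | x :: rest => badAux x rest 1
  match bad with
  | [] => 1
  | i :: t =>
    -- any(j != i + 1 for j in bad[1:])
    if t.any (fun j => j ≠ i + 1) then 0
    -- xs[i+1], xs[i-1]: indices are nonnegative and in range (i ≥ 1 and i+1 < n guarded),
    -- so List.getD is exact for Python's indexing here
    else if i + 1 < n ∧ (xs.getD (i+1) 0 ≤ xs.getD (i-1) 0 ∨ xs.getD (i+1) 0 > xs.getD (i-1) 0 + 3) then 0
    else 1

-- ===== PRECONDITION & SPEC =====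
-- Pre_ excludes only the empty list, on which A raises IndexError (xs[0]).
def Pre_incSafe (xs : List Int) : Prop := xs ≠ []
instance (xs : List Int) : Decidable (Pre_incSafe xs) := by unfold Pre_incSafe; infer_instance
def pvWitness_incSafe : List Int := ([1, 2, 3])

-- On the empty list A raises IndexError (xs[0]); B returns 1, an empty report being trivially in order.
def Raises_incSafe (xs : List Int) : Prop := xs = []
instance (xs : List Int) : Decidable (Raises_incSafe xs) := by unfold Raises_incSafe; infer_instance
def pvRaiseWitness_incSafe : List Int := ([])
def pvRaiseWitnessOut_incSafe : Int := 1

def Spec_incSafe (xs : List Int) (out : Int) : Prop := out = incSafe_alt xs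
instance (xs : List Int) (out : Int) : Decidable (Spec_incSafe xs out) := by unfold Spec_incSafe; infer_instance

-- ===== CLAIM (what is proved, stated in full; the proofs are below) =====
def Claim_equal_incSafe : Prop := ∀ (xs : List Int), Dom_incSafe xs → Pre_incSafe xs → Spec_incSafe xs (incSafe xs)
def Claim_raises_incSafe : Prop := (∀ (xs : List Int), Dom_incSafe xs → Raises_incSafe xs → ¬ Pre_incSafe xs) ∧ (Dom_incSafe (pvRaiseWitness_incSafe) ∧ Raises_incSafe (pvRaiseWitness_incSafe) ∧ incSafe_alt (pvRaiseWitness_incSafe) = pvRaiseWitnessOut_incSafe)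

-- ===== LEMMAS AND PROOFS =====

-- proof-only: 0-based list of violating pair positions in prev::ys
def badL (prev : Int) (ys : List Int) : List Nat :=
  match ys with
  | [] => []
  | y :: rest =>
    if y ≤ prev ∨ y > prev + 3 then 0 :: (badL y rest).map (· + 1)
    else (badL y rest).map (· + 1)

-- proof-only: 0-based first violating pair position
def fb (prev : Int) (ys : List Int) : Option Nat :=
  match ys with
  | [] => none
  | y :: rest => if y ≤ prev ∨ y > prev + 3 then some 0 else (fb y rest).map (· + 1)

theorem fb_eq_head (ys : List Int) : ∀ prev, fb prev ys = (badL prev ys).head? := by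
  induction ys with
  | nil => intro prev; rfl
  | cons y rest ih =>
    intro prev
    by_cases h : y ≤ prev ∨ y > prev + 3
    · simp [fb, badL, h]
    · simp only [fb, badL, if_neg h, ih]
      cases badL y rest <;> rfl

theorem badL_nil_iff (prev : Int) (ys : List Int) : badL prev ys = [] ↔ fb prev ys = none := by
  rw [fb_eq_head]; cases badL prev ys <;> simp

theorem badAux_eq_badL (ys : List Int) : ∀ (prev : Int) (i : Nat),
    badAux prev ys i = (badL prev ys).map (· + i) := by
  induction ys with
  | nil => intro prev i; rfl
  | cons y rest ih =>
    intro prev i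
    by_cases h : y ≤ prev ∨ y > prev + 3
    · simp only [badAux, badL, if_pos h, ih, List.singleton_append, List.map_cons,
        List.map_map]
      refine List.cons_eq_cons.mpr ⟨by omega, ?_⟩
      exact List.map_congr_left (fun a _ => by simp; omega)
    · simp only [badAux, badL, if_neg h, ih, List.nil_append, List.map_map]
      exact List.map_congr_left (fun a _ => by simp; omega)

theorem incSafe1_eq_fb (ys : List Int) : ∀ (prev : Int),
    incSafe1 prev ys = if fb prev ys = none then 1 else 0 := by
  induction ys with
  | nil => intro prev; rfl
  | cons y rest ih =>
    intro prev
    by_cases h : y ≤ prev ∨ y > prev + 3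
    · simp [incSafe1, fb, h]
    · simp only [incSafe1, fb, if_neg h]
      rw [ih]
      cases fb y rest <;> simp

theorem main_fb (ys : List Int) : ∀ (prev : Int),
    (fb prev ys = none → incSafeLoop prev ys = 1) ∧
    (∀ k, fb prev ys = some k →
      incSafeLoop prev ys = if fb prev (ys.take k ++ ys.drop (k + 1)) = none then 1 else 0) := by
  induction ys with
  | nil => intro prev; exact ⟨fun _ => rfl, fun k h => by simp [fb] at h⟩
  | cons y rest ih =>
    intro prev
    by_cases h : y ≤ prev ∨ y > prev + 3
    · constructor
      · intro hn; simp [fb, h] at hn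
      · intro k hk
        simp only [fb, if_pos h] at hk
        cases hk
        simpa [incSafeLoop, if_pos h] using incSafe1_eq_fb rest prev
    · constructor
      · intro hn
        simp only [fb, if_neg h, Option.map_eq_none_iff] at hn
        simpa [incSafeLoop, if_neg h] using (ih y).1 hn
      · intro k hk
        simp only [fb, if_neg h, Option.map_eq_some_iff] at hk
        obtain ⟨k', hk', rfl⟩ := hk
        have := (ih y).2 k' hk'
        simp only [incSafeLoop, if_neg h, this]
        have : fb prev (y :: (rest.take k' ++ rest.drop (k' + 1))) =
            (fb y (rest.take k' ++ rest.drop (k' + 1))).map (· + 1) := by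
          simp [fb, if_neg h]
        simp only [List.take_succ_cons, List.drop_succ_cons, List.cons_append, this]
        cases fb y (rest.take k' ++ rest.drop (k' + 1)) <;> simp

-- helper: badL all-zero means the tail chain (ignoring its leading pair) is clean
theorem base_iff (r : List Int) (prev y : Int) :
    (fb prev r = none) ↔
      ((badL y r).all (fun j => j = 0) = true ∧
       (2 < (prev :: y :: r).length →
         ¬((prev :: y :: r).getD 2 0 ≤ prev ∨ (prev :: y :: r).getD 2 0 > prev + 3))) := by
  cases r with
  | nil => simp [fb, badL]
  | cons z r' =>
    by_cases hz : z ≤ prev ∨ z > prev + 3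
    · simp only [fb, if_pos hz]
      constructor
      · intro h; cases h
      · rintro ⟨-, h2⟩
        exact absurd hz (by simpa using h2 (by simp))
    · simp only [fb, if_neg hz]
      by_cases hyz : z ≤ y ∨ z > y + 3
      · simp only [badL, if_pos hyz]
        constructor
        · intro h
          refine ⟨?_, fun _ => by simpa using hz⟩
          simp only [Option.map_eq_none_iff] at h
          have : badL z r' = [] := (badL_nil_iff z r').mpr h
          simp [this]
        · rintro ⟨h1, -⟩
          simp only [List.all_cons, List.all_map] at h1
          have : badL z r' = [] := by
            cases hb : badL z r' with
            | nil => rfl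
            | cons a l => rw [hb] at h1; simp at h1
          rw [(badL_nil_iff z r').mp this]; rfl
      · simp only [badL, if_neg hyz]
        constructor
        · intro h
          refine ⟨?_, fun _ => by simpa using hz⟩
          simp only [Option.map_eq_none_iff] at h
          have : badL z r' = [] := (badL_nil_iff z r').mpr h
          simp [this]
        · rintro ⟨h1, -⟩
          simp only [List.all_map] at h1
          have : badL z r' = [] := by
            cases hb : badL z r' with
            | nil => rfl
            | cons a l => rw [hb] at h1; simp at h1
          rw [(badL_nil_iff z r').mp this]; rfl

-- key: the delete-and-rescan test equals B's local condition
theorem key (ys : List Int) : ∀ (prev : Int) (k : Nat) (t : List Nat),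
    badL prev ys = k :: t →
    ((fb prev (ys.take k ++ ys.drop (k + 1)) = none) ↔
     (t.all (fun j => j = k + 1) = true ∧
      (k + 2 < (prev :: ys).length →
        ¬((prev :: ys).getD (k + 2) 0 ≤ (prev :: ys).getD k 0 ∨
          (prev :: ys).getD (k + 2) 0 > (prev :: ys).getD k 0 + 3)))) := by
  induction ys with
  | nil => intro prev k t h; simp [badL] at h
  | cons y r ih =>
    intro prev k t h
    by_cases hy : y ≤ prev ∨ y > prev + 3
    · simp only [badL, if_pos hy] at h
      obtain ⟨rfl, rfl⟩ : 0 = k ∧ (badL y r).map (· + 1) = t := by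
        injection h with h1 h2; exact ⟨h1, h2⟩
      simp only [List.take_zero, List.drop_succ_cons, List.drop_zero, List.nil_append]
      have := base_iff r prev y
      simpa [List.all_map, List.getD] using this
    · simp only [badL, if_neg hy] at h
      cases hb : badL y r with
      | nil => rw [hb] at h; simp at h
      | cons k' t' =>
        rw [hb] at h
        obtain ⟨rfl, rfl⟩ : k' + 1 = k ∧ t'.map (· + 1) = t := by
          injection h with h1 h2; exact ⟨h1, h2⟩
        have IH := ih y k' t' hb
        have htake : (y :: r).take (k' + 1) ++ (y :: r).drop (k' + 1 + 1) =
            y :: (r.take k' ++ r.drop (k' + 1)) := by simp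
        rw [htake]
        have hfb : fb prev (y :: (r.take k' ++ r.drop (k' + 1))) =
            (fb y (r.take k' ++ r.drop (k' + 1))).map (· + 1) := by
          simp [fb, if_neg hy]
        rw [hfb]
        constructor
        · intro hnone
          simp only [Option.map_eq_none_iff] at hnone
          have := IH.mp hnone
          refine ⟨by simpa [List.all_map] using this.1, fun hlen => ?_⟩
          have := this.2 (by simpa using hlen)
          simpa [List.getD] using this
        · rintro ⟨h1, h2⟩
          have : fb y (r.take k' ++ r.drop (k' + 1)) = none := by
            refine IH.mpr ⟨by simpa [List.all_map] using h1, fun hlen => ?_⟩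
            have := h2 (by simpa using hlen)
            simpa [List.getD] using this
          simp [this]

-- ===== VERDICT (by name: the statement is the Claim_ definition above) =====
theorem incSafe_spec : Claim_equal_incSafe := by
  intro xs _ hpre
  unfold Spec_incSafe
  cases xs with
  | nil => exact absurd rfl hpre
  | cons x0 rest =>
    show incSafeLoop x0 rest = incSafe_alt (x0 :: rest)
    simp only [incSafe_alt]
    rw [badAux_eq_badL]
    cases hb : badL x0 rest with
    | nil =>
      have hfb : fb x0 rest = none := (badL_nil_iff x0 rest).mp hb
      simpa using (main_fb rest x0).1 hfb
    | cons k t =>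
      have hfb : fb x0 rest = some k := by rw [fb_eq_head, hb]; rfl
      have hA := (main_fb rest x0).2 k hfb
      have hkey := key rest x0 k t hb
      rw [hA]
      simp only [List.map_cons, Nat.add_sub_cancel,
        show k + 1 + 1 = k + 2 from by omega]
      by_cases h1 : (t.all (fun j => j = k + 1)) = true
      · have e1 : ((t.map (· + 1)).any (fun j => j ≠ k + 2)) = false := by
          simp only [List.any_map, List.any_eq_false, Function.comp]
          intro j hj
          have := (List.all_eq_true.mp h1) j hj
          simp at this ⊢; omega
        rw [e1]
        simp only [Bool.false_eq_true, if_false]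
        by_cases h2 : k + 2 < (x0 :: rest).length ∧
            ((x0 :: rest).getD (k + 2) 0 ≤ (x0 :: rest).getD k 0 ∨
             (x0 :: rest).getD (k + 2) 0 > (x0 :: rest).getD k 0 + 3)
        · have hnot : ¬ fb x0 (rest.take k ++ rest.drop (k + 1)) = none := by
            intro hn
            exact (hkey.mp hn).2 h2.1 h2.2
          rw [if_neg hnot, if_pos h2]
        · have hyes : fb x0 (rest.take k ++ rest.drop (k + 1)) = none := by
            refine hkey.mpr ⟨h1, fun hlen hviol => h2 ⟨hlen, hviol⟩⟩
          rw [if_pos hyes, if_neg h2]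
      · have e1 : ((t.map (· + 1)).any (fun j => j ≠ k + 2)) = true := by
          simp only [List.any_map, List.any_eq_true, Function.comp]
          simp only [List.all_eq_true] at h1
          push Not at h1
          obtain ⟨j, hj, hne⟩ := h1
          exact ⟨j, hj, by simp at hne ⊢; omega⟩
        have hnot : ¬ fb x0 (rest.take k ++ rest.drop (k + 1)) = none := by
          intro hn; exact h1 (hkey.mp hn).1
        rw [if_neg hnot, e1, if_pos rfl]

theorem incSafe_raises : Claim_raises_incSafe := by
  unfold Claim_raises_incSafe
  exact ⟨fun xs _ h => by simp [Pre_incSafe, Raises_incSafe] at *; exact h, by decide⟩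

-- self-check: the raise witness really lies inside Raises_incSafe
theorem pvRaiseWitness_ok : Raises_incSafe pvRaiseWitness_incSafe := incSafe_raises.2.2.1
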